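-- pv_equiv track=rewrite | github.com/mkhazaeidev/MihanBanoo | extensions/utils.py | persian_week_days
-- ===== SOURCE A (Python) =====
-- def persian_week_days(day):
--     week_days = {
--         '1': 'شنبه',
--         '2': 'یک شنبه',
--         '3': 'دوشنبه',
--         '4': 'سه شنبه',
--         '5': 'چهار شنبه',
--         '6': 'پنج شنبه',
--         '7': 'جمعه',
--     }
--     for en_day, fa_day in week_days.items():
--         day = day.replace(en_day, fa_day)
--     return day
-- ===== SOURCE B (Python) =====
-- def persian_week_days(day):
--     week_days = {
--         '1': 'شنبه',
--         '2': 'یک شنبه',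
--         '3': 'دوشنبه',
--         '4': 'سه شنبه',
--         '5': 'چهار شنبه',
--         '6': 'پنج شنبه',
--         '7': 'جمعه',
--     }
--     return ''.join(week_days.get(c, c) for c in day)
-- ===== Notes on version B (the rewrite author's own statement) =====
-- stated objective: idiomatic
-- what changed: Replaces seven sequential whole-string str.replace passes with a single per-character pass that joins week_days.get(c, c) over the input (valid because the replacement strings contain no ASCII digits).
import Mathlib
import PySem

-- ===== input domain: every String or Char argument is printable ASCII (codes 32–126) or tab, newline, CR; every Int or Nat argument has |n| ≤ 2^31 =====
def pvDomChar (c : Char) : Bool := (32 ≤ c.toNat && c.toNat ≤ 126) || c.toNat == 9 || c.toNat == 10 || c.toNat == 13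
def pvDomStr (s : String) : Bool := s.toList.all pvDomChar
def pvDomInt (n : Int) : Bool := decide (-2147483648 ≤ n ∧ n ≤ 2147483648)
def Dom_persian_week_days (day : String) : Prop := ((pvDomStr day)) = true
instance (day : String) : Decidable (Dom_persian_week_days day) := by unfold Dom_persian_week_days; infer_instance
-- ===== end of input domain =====

-- B replaces A's seven sequential whole-string replace passes by one per-character pass
-- (dict lookup with the character itself as default, joined); same return value.

-- ===== PORT A =====
def pwdDictA : PySem.Dict String String := PySem.Dict.ofList
  [("1", "شنبه"), ("2", "یک شنبه"), ("3", "دوشنبه"), ("4", "سه شنبه"),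
   ("5", "چهار شنبه"), ("6", "پنج شنبه"), ("7", "جمعه")]

def persian_week_days (day : String) : String :=
  (PySem.Dict.items pwdDictA).foldl (fun d p => PySem.Str.replace d p.1 p.2) day

-- ===== PORT B =====
def pwdMapB : PySem.Dict Char String := PySem.Dict.ofList
  [('1', "شنبه"), ('2', "یک شنبه"), ('3', "دوشنبه"), ('4', "سه شنبه"),
   ('5', "چهار شنبه"), ('6', "پنج شنبه"), ('7', "جمعه")]

def persian_week_days_alt (day : String) : String :=
  PySem.Str.join "" (day.toList.map (fun c => PySem.Dict.getD pwdMapB c (String.ofList [c])))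

-- ===== PRECONDITION & SPEC =====
def Spec_persian_week_days (day : String) (out : String) : Prop := out = persian_week_days_alt day
instance (day : String) (out : String) : Decidable (Spec_persian_week_days day out) := by unfold Spec_persian_week_days; infer_instance

-- ===== CLAIM (what is proved, stated in full; the proofs are below) =====
def Claim_equal_persian_week_days : Prop := ∀ (day : String), Dom_persian_week_days day → Spec_persian_week_days day (persian_week_days day)

-- ===== LEMMAS AND PROOFS =====

-- single-character replace is a per-character flatMap
theorem pwd_go_single (d : Char) (rep : List Char) :
    ∀ (fuel : Nat) (s acc : List Char), s.length ≤ fuel →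
      PySem.Chars.replace.go [d] rep fuel s acc
        = acc.reverse ++ s.flatMap (fun c => if c = d then rep else [c]) := by
  intro fuel
  induction fuel with
  | zero =>
    intro s acc h
    cases s with
    | nil => simp [PySem.Chars.replace.go]
    | cons c t => simp at h
  | succ n ih =>
    intro s acc h
    cases s with
    | nil => simp [PySem.Chars.replace.go]
    | cons c t =>
      by_cases hc : c = d
      · subst hc
        have hp : List.isPrefixOf [c] (c :: t) = true := by
          simp [List.isPrefixOf]
        simp only [PySem.Chars.replace.go, hp, if_pos, List.length_cons, List.length_nil,
          List.drop_succ_cons, List.drop_zero]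
        rw [ih t (rep.reverse ++ acc) (by simpa using Nat.le_of_succ_le_succ h)]
        simp
      · have hp : List.isPrefixOf [d] (c :: t) = false := by
          simp [List.isPrefixOf]
          exact fun hdc => absurd hdc.symm hc
        simp only [PySem.Chars.replace.go, hp]
        rw [ih t (c :: acc) (by simpa using Nat.le_of_succ_le_succ h)]
        simp [hc]

theorem pwd_replace_single (s : List Char) (d : Char) (rep : List Char) :
    PySem.Chars.replace s [d] rep = s.flatMap (fun c => if c = d then rep else [c]) := by
  simpa [PySem.Chars.replace] using pwd_go_single d rep s.length s [] (le_refl _)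

-- the per-character effect of the whole seven-pass chain
def pwdF (c : Char) : List Char :=
  List.flatMap (fun x =>
    List.flatMap (fun x =>
      List.flatMap (fun x =>
        List.flatMap (fun x =>
          List.flatMap (fun x =>
            List.flatMap (fun c => if c = '7' then "جمعه".toList else [c])
              (if x = '6' then "پنج شنبه".toList else [x]))
            (if x = '5' then "چهار شنبه".toList else [x]))
          (if x = '4' then "سه شنبه".toList else [x]))
        (if x = '3' then "دوشنبه".toList else [x]))
      (if x = '2' then "یک شنبه".toList else [x]))
    (if c = '1' then "شنبه".toList else [c])

theorem pwd_chain (s : List Char) :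
    (persian_week_days (String.ofList s)).toList = s.flatMap pwdF := by
  show (PySem.Str.replace (PySem.Str.replace (PySem.Str.replace (PySem.Str.replace
      (PySem.Str.replace (PySem.Str.replace (PySem.Str.replace (String.ofList s)
      "1" "شنبه") "2" "یک شنبه") "3" "دوشنبه") "4" "سه شنبه") "5" "چهار شنبه")
      "6" "پنج شنبه") "7" "جمعه").toList = s.flatMap pwdF
  simp only [PySem.Str.toList_replace]
  simp only [show ("1" : String).toList = ['1'] from rfl, show ("2" : String).toList = ['2'] from rfl,
    show ("3" : String).toList = ['3'] from rfl, show ("4" : String).toList = ['4'] from rfl,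
    show ("5" : String).toList = ['5'] from rfl, show ("6" : String).toList = ['6'] from rfl,
    show ("7" : String).toList = ['7'] from rfl]
  simp only [pwd_replace_single, List.flatMap_assoc, String.toList_ofList]
  rfl

-- the chain's per-character effect is exactly B's lookup
theorem pwd_F_eq (c : Char) :
    pwdF c = (PySem.Dict.getD pwdMapB c (String.ofList [c])).toList := by
  by_cases h1 : c = '1'; · subst h1; decide
  by_cases h2 : c = '2'; · subst h2; decide
  by_cases h3 : c = '3'; · subst h3; decide
  by_cases h4 : c = '4'; · subst h4; decide
  by_cases h5 : c = '5'; · subst h5; decide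
  by_cases h6 : c = '6'; · subst h6; decide
  by_cases h7 : c = '7'; · subst h7; decide
  have g1 : ('1' : Char) ≠ c := Ne.symm h1
  have g2 : ('2' : Char) ≠ c := Ne.symm h2
  have g3 : ('3' : Char) ≠ c := Ne.symm h3
  have g4 : ('4' : Char) ≠ c := Ne.symm h4
  have g5 : ('5' : Char) ≠ c := Ne.symm h5
  have g6 : ('6' : Char) ≠ c := Ne.symm h6
  have g7 : ('7' : Char) ≠ c := Ne.symm h7
  simp [pwdF, pwdMapB, PySem.Dict.getD, PySem.Dict.ofList, PySem.Dict.get?,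
    PySem.Dict.update, PySem.Dict.empty, PySem.Dict.insert,
    h1, h2, h3, h4, h5, h6, h7, g1, g2, g3, g4, g5, g6, g7]

theorem pwd_join_nil (l : List (List Char)) : PySem.Chars.join [] l = l.flatten := by
  induction l with
  | nil => rfl
  | cons a t ih =>
    simp [PySem.Chars.join, List.intercalate] at *
    induction t <;> simp_all

-- ===== VERDICT (by name: the statement is the Claim_ definition above) =====
theorem persian_week_days_spec : Claim_equal_persian_week_days := by
  intro day _
  show persian_week_days day = persian_week_days_alt day
  apply String.toList_inj.mp
  have hd : String.ofList day.toList = day := String.ofList_toList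
  conv_lhs => rw [← hd]
  rw [pwd_chain]
  simp only [persian_week_days_alt, PySem.Str.toList_join]
  rw [show ("" : String).toList = ([] : List Char) from rfl, pwd_join_nil,
    List.flatMap_def, List.map_map]
  exact congrArg List.flatten (List.map_congr_left (fun c _ => pwd_F_eq c))
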